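-- pv_equiv track=rewrite | github.com/fu-group/fu | src/lib.py | CompressIntData
-- ===== SOURCE A (Python) =====
-- def CompressIntData(expnint):
--     """ return compressed integer data (See ExpnIntDat)
--     i.e. 1,3,4,5, 10,11,12, 18,... -> 1,3 -5,10 -12,18,...
--
--     :param lst expnint: list of integers
--     :return: cmplst(lst) - compressed list of integers
--     :seealso: ExpandIntData()
--     """
--     compint=[]; n=len(expnint)
--     if n <= 0: return compint
--     compint.append(expnint[0]); ni=0
--     for i in range(1,n):
--         if expnint[i] == expnint[i-1]+1: ni += 1
--         else:
--             if ni == 1: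
--                 compint.append(expnint[i-1]); ni=0
--                 #compint.append(expnint[i])
--             elif ni > 1:
--                 compint.append(-expnint[i-1]); ni=0
--             compint.append(expnint[i]); ni=0
--     if ni > 1: compint.append(-expnint[n-1])
--     if ni == 1: compint.append(expnint[n-1])
--     return compint
-- ===== SOURCE B (Python) =====
-- def _run_end(expnint, i):
--     """Starting at index i, scan to the last index of the maximal
--     consecutive run beginning there; return that index."""
--     j = i
--     while j + 1 < len(expnint) and expnint[j + 1] == expnint[j] + 1:
--         j += 1
--     return j
--
-- def CompressIntData(expnint):
--     out = []
--     i = 0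
--     while i < len(expnint):
--         j = _run_end(expnint, i)
--         s, e = expnint[i], expnint[j]
--         if e == s:
--             out += [s]
--         elif e == s + 1:
--             out += [s, e]
--         else:
--             out += [s, -e]
--         i = j + 1
--     return out
-- ===== Notes on version B (the rewrite author's own statement) =====
-- stated objective: simpler
-- what changed: B partitions the list into maximal consecutive runs (skipping each run in one inner scan) and emits start / start,end / start,-end per run, replacing A's flat state machine with a counter ni and trailing flush logic.
import Mathlib
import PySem

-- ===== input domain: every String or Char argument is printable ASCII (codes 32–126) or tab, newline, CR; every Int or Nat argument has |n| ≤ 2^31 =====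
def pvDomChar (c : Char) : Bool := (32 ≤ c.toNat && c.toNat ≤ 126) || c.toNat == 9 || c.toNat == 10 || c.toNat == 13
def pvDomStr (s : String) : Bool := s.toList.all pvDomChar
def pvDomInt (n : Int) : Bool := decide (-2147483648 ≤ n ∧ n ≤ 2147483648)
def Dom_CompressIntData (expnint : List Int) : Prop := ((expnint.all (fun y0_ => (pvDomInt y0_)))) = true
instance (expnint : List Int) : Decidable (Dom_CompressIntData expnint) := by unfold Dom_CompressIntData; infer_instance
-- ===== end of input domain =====

-- B replaces A's flat state machine (counter ni + trailing flush) by a run-partitioning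
-- scan that emits each maximal consecutive run at once; objective: simpler.

-- ===== PORT A =====
-- A's for-loop over i in range(1,n): state (compint, ni), prev = expnint[i-1]
def pvLoopA (compint : List Int) (ni : Int) (prev : Int) :
    List Int → List Int × Int × Int
  | [] => (compint, ni, prev)
  | x :: xs =>
      if x = prev + 1 then pvLoopA compint (ni + 1) x xs
      else if ni = 1 then pvLoopA (compint ++ [prev] ++ [x]) 0 x xs
      else if ni > 1 then pvLoopA (compint ++ [-prev] ++ [x]) 0 x xs
      else pvLoopA (compint ++ [x]) 0 x xs

def CompressIntData (expnint : List Int) : List Int :=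
  match expnint with
  | [] => []
  | x :: xs =>
      let r := pvLoopA [x] 0 x xs
      -- trailing flush: expnint[n-1] is the last prev
      if r.2.1 > 1 then r.1 ++ [-r.2.2]
      else if r.2.1 = 1 then r.1 ++ [r.2.2]
      else r.1

-- ===== PORT B =====
-- _take_run: scan for the end of the consecutive run continuing after prev
def pvTakeRun (prev : Int) : List Int → Int × List Int
  | [] => (prev, [])
  | x :: xs => if x = prev + 1 then pvTakeRun x xs else (prev, x :: xs)

theorem pvTakeRun_len : ∀ (xs : List Int) (prev : Int),
    (pvTakeRun prev xs).2.length ≤ xs.length := by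
  intro xs
  induction xs with
  | nil => intro prev; simp [pvTakeRun]
  | cons x xs ih =>
      intro prev
      by_cases h : x = prev + 1
      · simp only [pvTakeRun, if_pos h]
        exact Nat.le_succ_of_le (ih x)
      · simp [pvTakeRun, if_neg h]

def CompressIntData_alt : List Int → List Int
  | [] => []
  | x :: xs =>
      let p := pvTakeRun x xs
      (if p.1 = x then [x] else if p.1 = x + 1 then [x, p.1] else [x, -p.1])
        ++ CompressIntData_alt p.2
termination_by xs => xs.length
decreasing_by
  exact Nat.lt_succ_of_le (pvTakeRun_len xs x)

-- ===== PRECONDITION & SPEC =====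
def Spec_CompressIntData (expnint : List Int) (out : List Int) : Prop := out = CompressIntData_alt expnint
instance (expnint : List Int) (out : List Int) : Decidable (Spec_CompressIntData expnint out) := by unfold Spec_CompressIntData; infer_instance

-- ===== CLAIM (what is proved, stated in full; the proofs are below) =====
def Claim_equal_CompressIntData : Prop := ∀ (expnint : List Int), Dom_CompressIntData expnint → Spec_CompressIntData expnint (CompressIntData expnint)

-- ===== LEMMAS AND PROOFS =====

-- A's trailing flush, as a function of the loop's final state
def pvFinishA (r : List Int × Int × Int) : List Int :=
  if r.2.1 > 1 then r.1 ++ [-r.2.2]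
  else if r.2.1 = 1 then r.1 ++ [r.2.2]
  else r.1

-- what B emits for a run with start s and end e, minus the leading s
def pvEmitTail (s e : Int) : List Int :=
  if e = s then [] else if e = s + 1 then [e] else [-e]

theorem CompressIntData_alt_cons (x : Int) (xs : List Int) :
    CompressIntData_alt (x :: xs)
      = (x :: pvEmitTail x (pvTakeRun x xs).1) ++ CompressIntData_alt (pvTakeRun x xs).2 := by
  rw [CompressIntData_alt]
  rcases pvTakeRun x xs with ⟨e, r⟩
  simp only [pvEmitTail]
  by_cases h1 : e = x
  · simp [h1]
  · by_cases h2 : e = x + 1 <;> simp [h1, h2]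

-- loop invariant: finishing A's loop from state (compint, ni, prev) yields compint
-- followed by B's emission for the current run (start prev - ni) and the rest
theorem pvLoop_inv : ∀ (rest : List Int) (prev ni : Int) (compint : List Int), 0 ≤ ni →
    pvFinishA (pvLoopA compint ni prev rest)
      = compint ++ pvEmitTail (prev - ni) (pvTakeRun prev rest).1
          ++ CompressIntData_alt (pvTakeRun prev rest).2 := by
  intro rest
  induction rest with
  | nil =>
      intro prev ni compint hni
      simp only [pvLoopA, pvTakeRun, CompressIntData_alt, List.append_nil]
      unfold pvFinishA pvEmitTail
      by_cases h1 : ni > 1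
      · rw [if_pos h1, if_neg (show ¬ prev = prev - ni by omega),
            if_neg (show ¬ prev = prev - ni + 1 by omega)]
      · by_cases h2 : ni = 1
        · rw [if_neg h1, if_pos h2, if_neg (show ¬ prev = prev - ni by omega),
              if_pos (show prev = prev - ni + 1 by omega)]
        · rw [if_neg h1, if_neg h2, if_pos (show prev = prev - ni by omega)]
          simp
  | cons x xs ih =>
      intro prev ni compint hni
      by_cases hx : x = prev + 1
      · simp only [pvLoopA, if_pos hx, pvTakeRun]
        rw [ih x (ni + 1) compint (by omega)]
        have : x - (ni + 1) = prev - ni := by omega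
        rw [this]
      · simp only [pvLoopA, if_neg hx, pvTakeRun]
        have hrest : pvFinishA (pvLoopA (compint ++ pvEmitTail (prev - ni) prev ++ [x]) 0 x xs)
            = compint ++ pvEmitTail (prev - ni) prev ++ [x]
              ++ pvEmitTail x (pvTakeRun x xs).1 ++ CompressIntData_alt (pvTakeRun x xs).2 := by
          rw [ih x 0 _ le_rfl]
          simp
        by_cases h1 : ni = 1
        · have he : pvEmitTail (prev - ni) prev = [prev] := by
            simp only [pvEmitTail]; rw [if_neg (by omega), if_pos (by omega)]
          rw [if_pos h1]
          rw [show compint ++ [prev] ++ [x] = compint ++ pvEmitTail (prev - ni) prev ++ [x] by rw [he]]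
          rw [hrest, CompressIntData_alt_cons]
          simp
        · by_cases h2 : ni > 1
          · have he : pvEmitTail (prev - ni) prev = [-prev] := by
              simp only [pvEmitTail]; rw [if_neg (by omega), if_neg (by omega)]
            rw [if_neg h1, if_pos h2]
            rw [show compint ++ [-prev] ++ [x] = compint ++ pvEmitTail (prev - ni) prev ++ [x] by rw [he]]
            rw [hrest, CompressIntData_alt_cons]
            simp
          · have h0 : ni = 0 := by omega
            have he : pvEmitTail (prev - ni) prev = [] := by
              simp only [pvEmitTail]; rw [if_pos (by omega)]
            rw [if_neg h1, if_neg h2]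
            rw [show compint ++ [x] = compint ++ pvEmitTail (prev - ni) prev ++ [x] by rw [he]; simp]
            rw [hrest, CompressIntData_alt_cons]
            simp

-- ===== VERDICT (by name: the statement is the Claim_ definition above) =====
theorem CompressIntData_spec : Claim_equal_CompressIntData := by
  intro expnint _
  unfold Spec_CompressIntData
  match expnint with
  | [] => simp [CompressIntData, CompressIntData_alt]
  | x :: xs =>
      have h : CompressIntData (x :: xs) = pvFinishA (pvLoopA [x] 0 x xs) := by
        simp [CompressIntData, pvFinishA]
      rw [h, pvLoop_inv xs x 0 [x] le_rfl, CompressIntData_alt_cons]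
      simp
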